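-- pv_equiv track=rewrite | github.com/pypi-data/pypi-mirror-59 | packages/danlu-tracing-python2/danlu_tracing_python2-0.0.0.5.tar.gz/danlu_tracing_python2-0.0.0.5/danlu_tracing/__init__.py | get_forward_headers
-- ===== SOURCE A (Python) =====
-- def get_forward_headers(raw_headers):
--     """Get forward headers for danlu_tracing.
--
--     :param raw_headers:
--         Dict type. the headers request contains.
--     :return:
--         Dict type. the headers should be forward to next request.
--     """
--     headers = {}
--
--     incoming_headers = ['x-request-id', 'x-datadog-trace-id', 'x-datadog-parent-id', 'x-datadog-sampled',
--                         "x-b3-traceid", "x-b3-spanid", "x-b3-parentspanid", "x-b3-sampled", "x-b3-flags"]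
--     for ihdr in incoming_headers:
--         val = raw_headers.get(ihdr)
--         if val is not None:
--             headers[ihdr] = val
--
--     return headers
-- ===== SOURCE B (Python) =====
-- _FORWARD_POS = {
--     'x-request-id': 0, 'x-datadog-trace-id': 1, 'x-datadog-parent-id': 2,
--     'x-datadog-sampled': 3, 'x-b3-traceid': 4, 'x-b3-spanid': 5,
--     'x-b3-parentspanid': 6, 'x-b3-sampled': 7, 'x-b3-flags': 8,
-- }
--
--
-- def get_forward_headers(raw_headers):
--     # One pass over the incoming headers: drop each pair into its slot
--     # (slot order = the canonical forward-header order), first hit wins.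
--     slots = [None] * 9
--     for k, v in raw_headers.items():
--         i = _FORWARD_POS.get(k)
--         if i is not None and v is not None and slots[i] is None:
--             slots[i] = (k, v)
--     return dict(s for s in slots if s is not None)
-- ===== Notes on version B (the rewrite author's own statement) =====
-- stated objective: alternative
-- what changed: Instead of looping over the fixed list of nine header names and doing a dict lookup for each, B makes a single pass over the incoming headers, dropping each recognised pair (via a name-to-position map) into a fixed slot array, first hit wins, and returns the non-empty slots in canonical order.
import Mathlib
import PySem

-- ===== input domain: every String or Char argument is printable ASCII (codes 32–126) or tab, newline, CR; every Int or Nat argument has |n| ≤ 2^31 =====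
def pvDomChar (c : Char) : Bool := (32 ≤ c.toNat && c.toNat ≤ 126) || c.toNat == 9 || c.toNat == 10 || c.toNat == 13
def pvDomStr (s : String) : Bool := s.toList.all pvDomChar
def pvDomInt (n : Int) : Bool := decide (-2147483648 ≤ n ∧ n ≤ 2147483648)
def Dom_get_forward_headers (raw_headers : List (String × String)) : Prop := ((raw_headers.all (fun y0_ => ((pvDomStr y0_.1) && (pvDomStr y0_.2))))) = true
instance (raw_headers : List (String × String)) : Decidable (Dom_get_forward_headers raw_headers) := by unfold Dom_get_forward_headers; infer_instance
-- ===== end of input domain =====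

-- B replaces A's loop over the fixed header-name list (one dict lookup each) by a single
-- pass over the incoming headers filling a 9-slot array (alternative decomposition).
-- Values are strings here (dict[str,str]), so A's 'val is not None' guard is always true.

-- ===== PORT A =====
-- the literal list of incoming header names from A
def pvIncoming : List String :=
  ["x-request-id", "x-datadog-trace-id", "x-datadog-parent-id", "x-datadog-sampled",
   "x-b3-traceid", "x-b3-spanid", "x-b3-parentspanid", "x-b3-sampled", "x-b3-flags"]

def get_forward_headers (raw_headers : List (String × String)) : List (String × String) :=
  (pvIncoming.foldl (fun headers ihdr =>
      match (PySem.Dict.mk raw_headers).get? ihdr with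
      | some v => headers.insert ihdr v
      | none => headers) PySem.Dict.empty).items

-- ===== PORT B =====
-- B's _FORWARD_POS map: header name -> slot position
def pvPos : PySem.Dict String Nat :=
  PySem.Dict.mk
    [("x-request-id", 0), ("x-datadog-trace-id", 1), ("x-datadog-parent-id", 2),
     ("x-datadog-sampled", 3), ("x-b3-traceid", 4), ("x-b3-spanid", 5),
     ("x-b3-parentspanid", 6), ("x-b3-sampled", 7), ("x-b3-flags", 8)]

-- B's loop: one pass over the incoming pairs, filling the slot array (first hit wins)
def pvFill : List (String × String) → List (Option (String × String)) → List (Option (String × String))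
  | [], slots => slots
  | (k, v) :: rest, slots =>
      match pvPos.get? k with
      | some i =>
          if slots.getD i none = none then pvFill rest (slots.set i (some (k, v)))
          else pvFill rest slots
      | none => pvFill rest slots

def get_forward_headers_alt (raw_headers : List (String × String)) : List (String × String) :=
  (pvFill raw_headers (List.replicate 9 none)).filterMap id

-- ===== PRECONDITION & SPEC =====
def Spec_get_forward_headers (raw_headers : List (String × String)) (out : List (String × String)) : Prop := out = get_forward_headers_alt raw_headers
instance (raw_headers : List (String × String)) (out : List (String × String)) : Decidable (Spec_get_forward_headers raw_headers out) := by unfold Spec_get_forward_headers; infer_instance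

-- ===== CLAIM (what is proved, stated in full; the proofs are below) =====
def Claim_equal_get_forward_headers : Prop := ∀ (raw_headers : List (String × String)), Dom_get_forward_headers raw_headers → Spec_get_forward_headers raw_headers (get_forward_headers raw_headers)

-- ===== LEMMAS AND PROOFS =====

-- first pair of l whose key maps to slot i
def pvFirstAt (l : List (String × String)) (i : Nat) : Option (String × String) :=
  match l with
  | [] => none
  | (k, v) :: t => if pvPos.get? k = some i then some (k, v) else pvFirstAt t i

theorem pvPos_lt {k : String} {j : Nat} (h : pvPos.get? k = some j) : j < 9 := by
  simp only [pvPos, PySem.Dict.get?_mk_cons] at h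
  split_ifs at h <;> simp_all [PySem.Dict.get?] <;> omega

theorem pvPos_iff (k : String) (i : Nat) (hi : i < 9) :
    pvPos.get? k = some i ↔ k = pvIncoming.getD i "" := by
  by_cases h0 : "x-request-id" = k
  · subst h0; interval_cases i <;> decide
  by_cases h1 : "x-datadog-trace-id" = k
  · subst h1; interval_cases i <;> decide
  by_cases h2 : "x-datadog-parent-id" = k
  · subst h2; interval_cases i <;> decide
  by_cases h3 : "x-datadog-sampled" = k
  · subst h3; interval_cases i <;> decide
  by_cases h4 : "x-b3-traceid" = k
  · subst h4; interval_cases i <;> decide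
  by_cases h5 : "x-b3-spanid" = k
  · subst h5; interval_cases i <;> decide
  by_cases h6 : "x-b3-parentspanid" = k
  · subst h6; interval_cases i <;> decide
  by_cases h7 : "x-b3-sampled" = k
  · subst h7; interval_cases i <;> decide
  by_cases h8 : "x-b3-flags" = k
  · subst h8; interval_cases i <;> decide
  simp only [pvPos, PySem.Dict.get?_mk_cons, beq_iff_eq,
    if_neg h0, if_neg h1, if_neg h2, if_neg h3, if_neg h4, if_neg h5, if_neg h6, if_neg h7, if_neg h8]
  interval_cases i <;> simp [pvIncoming, PySem.Dict.get?] <;>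
    first | exact Ne.symm h0 | exact Ne.symm h1 | exact Ne.symm h2 | exact Ne.symm h3 |
      exact Ne.symm h4 | exact Ne.symm h5 | exact Ne.symm h6 | exact Ne.symm h7 | exact Ne.symm h8

theorem pvFill_length (l : List (String × String)) :
    ∀ s, (pvFill l s).length = s.length := by
  induction l with
  | nil => intro s; simp [pvFill]
  | cons p t ih =>
    intro s
    obtain ⟨k, v⟩ := p
    rw [pvFill]
    cases h : pvPos.get? k with
    | none => exact ih s
    | some i =>
      dsimp only
      by_cases hs : s.getD i none = none
      · rw [if_pos hs, ih]; simp
      · rw [if_neg hs]; exact ih s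

theorem pvFill_getD (l : List (String × String)) :
    ∀ (s : List (Option (String × String))) (i : Nat), s.length = 9 →
      (pvFill l s).getD i none = (s.getD i none).or (pvFirstAt l i) := by
  induction l with
  | nil => intro s i _; simp [pvFill, pvFirstAt]
  | cons p t ih =>
    intro s i h9
    obtain ⟨k, v⟩ := p
    rw [pvFill, pvFirstAt]
    cases h : pvPos.get? k with
    | none =>
      rw [if_neg (by simp)]
      exact ih s i h9
    | some j =>
      dsimp only
      by_cases hij : j = i
      · subst hij
        by_cases hs : s.getD j none = none
        · rw [if_pos hs, if_pos rfl, ih _ j (by simp [h9])]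
          have hjlt : j < s.length := h9 ▸ pvPos_lt h
          rw [hs, List.getD_eq_getElem?_getD, List.getElem?_set_self hjlt]
          simp
        · rw [if_neg hs, if_pos rfl, ih s j h9]
          cases hsv : s.getD j none with
          | none => exact absurd hsv hs
          | some q => simp
      · have hne : ¬ ((some j : Option Nat) = some i) := by simp [hij]
        by_cases hs : s.getD j none = none
        · rw [if_pos hs, if_neg hne, ih _ i (by simp [h9])]
          have hjlt : j < s.length := h9 ▸ pvPos_lt h
          rw [List.getD_eq_getElem?_getD, List.getElem?_set_ne (by omega),
              ← List.getD_eq_getElem?_getD]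
        · rw [if_neg hs, if_neg hne]; exact ih s i h9

-- after the fill from all-empty slots, slot i holds the first pair mapping to i
theorem pvFill_init (l : List (String × String)) :
    pvFill l (List.replicate 9 none) =
      [pvFirstAt l 0, pvFirstAt l 1, pvFirstAt l 2, pvFirstAt l 3, pvFirstAt l 4,
       pvFirstAt l 5, pvFirstAt l 6, pvFirstAt l 7, pvFirstAt l 8] := by
  have hlen : (pvFill l (List.replicate 9 none)).length = 9 := by
    rw [pvFill_length]; simp
  have hget : ∀ i : Nat, i < 9 →
      (pvFill l (List.replicate 9 none)).getD i none = pvFirstAt l i := by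
    intro i hi
    rw [pvFill_getD l _ i (by simp), List.getD_replicate, Option.none_or]
    exact hi
  apply List.ext_getElem (by rw [pvFill_length]; rfl)
  intro i hi _
  have hi9 : i < 9 := by omega
  have := hget i hi9
  rw [List.getD_eq_getElem?_getD, List.getElem?_eq_getElem hi] at this
  simp only [Option.getD_some] at this
  rw [this]
  interval_cases i <;> rfl

theorem pvFirstAt_eq (i : Nat) (hi : i < 9) (l : List (String × String)) :
    pvFirstAt l i =
      ((PySem.Dict.mk l).get? (pvIncoming.getD i "")).map (fun v => (pvIncoming.getD i "", v)) := by
  induction l with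
  | nil => simp [pvFirstAt, PySem.Dict.get?]
  | cons p t ih =>
    obtain ⟨k, v⟩ := p
    rw [pvFirstAt, PySem.Dict.get?_mk_cons]
    by_cases hk : k = pvIncoming.getD i ""
    · rw [if_pos ((pvPos_iff k i hi).mpr hk)]
      subst hk
      simp only [beq_self_eq_true, if_true, Option.map_some]
    · rw [if_neg (fun h => hk ((pvPos_iff k i hi).mp h))]
      rw [if_neg (by simp only [beq_iff_eq]; exact hk)]
      exact ih

-- A's loop over distinct fresh names appends the found pairs in name order
theorem pvFoldA (raw : List (String × String)) :
    ∀ (ks : List String) (d : PySem.Dict String String), ks.Nodup →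
      (∀ k ∈ ks, d.contains k = false) →
      (ks.foldl (fun headers ihdr =>
          match (PySem.Dict.mk raw).get? ihdr with
          | some v => headers.insert ihdr v
          | none => headers) d).items
        = d.items ++ ks.filterMap (fun k => ((PySem.Dict.mk raw).get? k).map (fun v => (k, v))) := by
  intro ks
  induction ks with
  | nil => intro d _ _; simp
  | cons k t ih =>
    intro d hnd hfresh
    have hndt : t.Nodup := (List.nodup_cons.mp hnd).2
    have hknt : k ∉ t := (List.nodup_cons.mp hnd).1
    simp only [List.foldl_cons, List.filterMap_cons]
    cases hv : (PySem.Dict.mk raw).get? k with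
    | none =>
      simp only [Option.map_none]
      rw [ih d hndt (fun k' hk' => hfresh k' (List.mem_cons_of_mem _ hk'))]
    | some v =>
      simp only [Option.map_some]
      have hfk : d.contains k = false := hfresh k (List.mem_cons_self ..)
      have hfresh' : ∀ k' ∈ t, (d.insert k v).contains k' = false := by
        intro k' hk'
        rw [PySem.Dict.contains_insert]
        have : (k' == k) = false := by
          simp only [beq_eq_false_iff_ne, ne_eq]
          exact fun h => hknt (h ▸ hk')
        simp [this, hfresh k' (List.mem_cons_of_mem _ hk')]
      rw [ih (d.insert k v) hndt hfresh',
          PySem.Dict.items_insert_of_not_contains d v hfk]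
      simp

-- ===== VERDICT (by name: the statement is the Claim_ definition above) =====
theorem get_forward_headers_spec : Claim_equal_get_forward_headers := by
  intro raw _
  unfold Spec_get_forward_headers get_forward_headers get_forward_headers_alt
  rw [pvFoldA raw pvIncoming PySem.Dict.empty (by decide)
        (by intro k _; exact PySem.Dict.contains_empty k)]
  rw [pvFill_init raw]
  simp only [PySem.Dict.empty, List.nil_append]
  simp only [pvIncoming, List.filterMap_cons, List.filterMap_nil]
  rw [pvFirstAt_eq 0 (by omega), pvFirstAt_eq 1 (by omega), pvFirstAt_eq 2 (by omega),
      pvFirstAt_eq 3 (by omega), pvFirstAt_eq 4 (by omega), pvFirstAt_eq 5 (by omega),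
      pvFirstAt_eq 6 (by omega), pvFirstAt_eq 7 (by omega), pvFirstAt_eq 8 (by omega)]
  simp only [pvIncoming, List.getD_cons_zero, List.getD_cons_succ, id]
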